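-- pv_equiv track=rewrite | github.com/yoonwanggyu/BOAZ_ADV | Wang_Gyu/graphparser/core.py | extract_tag_elements_per_page
-- ===== SOURCE A (Python) =====
-- def extract_tag_elements_per_page(page_elements):
--     # 파싱된 페이지 요소들을 저장할 새로운 딕셔너리를 생성합니다.
--     parsed_page_elements = dict()
--
--     # 각 페이지와 해당 페이지의 요소들을 순회합니다.
--     for key, page_element in page_elements.items():
--         # 이미지, 테이블, 텍스트 요소들을 저장할 리스트를 초기화합니다.
--         image_elements = []
--         table_elements = []
--         text_elements = []
--
--         # 페이지의 각 요소를 순회하며 카테고리별로 분류합니다.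
--         for element in page_element:
--             if element["category"] == "figure":
--                 # 이미지 요소인 경우 image_elements 리스트에 추가합니다.
--                 image_elements.append(element)
--             elif element["category"] == "table":
--                 # 테이블 요소인 경우 table_elements 리스트에 추가합니다.
--                 table_elements.append(element)
--             else:
--                 # 그 외의 요소는 모두 텍스트 요소로 간주하여 text_elements 리스트에 추가합니다.
--                 text_elements.append(element)
--
--         # 분류된 요소들을 페이지 키와 함께 새로운 딕셔너리에 저장합니다.
--         parsed_page_elements[key] = {
--             "image_elements": image_elements,
--             "table_elements": table_elements,
--             "text_elements": text_elements,
--             "elements": page_element,  # 원본 페이지 요소도 함께 저장합니다.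
--         }
--
--     return parsed_page_elements
-- ===== SOURCE B (Python) =====
-- def extract_tag_elements_per_page(page_elements):
--     # Three declarative filters per page instead of one append-loop with branches.
--     return {
--         key: {
--             "image_elements": [e for e in page_element if e["category"] == "figure"],
--             "table_elements": [e for e in page_element if e["category"] == "table"],
--             "text_elements": [e for e in page_element if e["category"] not in ("figure", "table")],
--             "elements": page_element,
--         }
--         for key, page_element in page_elements.items()
--     }
-- ===== Notes on version B (the rewrite author's own statement) =====
-- stated objective: simpler
-- what changed: The stateful single-pass loop appending to three accumulator lists is replaced by a dict comprehension with three declarative filters (figure / table / everything else) per page.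
import Mathlib
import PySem

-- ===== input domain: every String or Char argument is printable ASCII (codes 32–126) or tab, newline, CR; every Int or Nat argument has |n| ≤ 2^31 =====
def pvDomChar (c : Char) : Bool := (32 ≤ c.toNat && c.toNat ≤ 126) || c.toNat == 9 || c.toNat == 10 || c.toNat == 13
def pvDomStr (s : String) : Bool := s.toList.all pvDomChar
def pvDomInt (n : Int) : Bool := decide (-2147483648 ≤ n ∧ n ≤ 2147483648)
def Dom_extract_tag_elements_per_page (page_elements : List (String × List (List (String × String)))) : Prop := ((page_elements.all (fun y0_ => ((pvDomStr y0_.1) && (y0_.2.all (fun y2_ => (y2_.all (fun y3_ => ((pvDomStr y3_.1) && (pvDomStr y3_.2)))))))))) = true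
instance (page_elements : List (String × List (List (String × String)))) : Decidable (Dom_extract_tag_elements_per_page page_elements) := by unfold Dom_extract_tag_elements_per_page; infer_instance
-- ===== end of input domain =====

-- B replaces A's stateful three-accumulator loop with a map producing three filters per page (objective: simpler).

-- ===== PORT A =====
-- element["category"]: first-match lookup in the association list; Python raises KeyError
-- when the key is absent — Pre_ excludes that, the port then files the element as text.
def pvCatA (e : List (String × String)) : Option String := e.lookup "category"

def extract_tag_elements_per_page (page_elements : List (String × List (List (String × String)))) : List (String × List (String × List (List (String × String)))) :=
  page_elements.foldl (fun parsed kv =>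
    let s := kv.2.foldl (fun (s : List (List (String × String)) × List (List (String × String)) × List (List (String × String))) e =>
      if pvCatA e = some "figure" then (s.1 ++ [e], s.2.1, s.2.2)
      else if pvCatA e = some "table" then (s.1, s.2.1 ++ [e], s.2.2)
      else (s.1, s.2.1, s.2.2 ++ [e])) ([], [], [])
    parsed ++ [(kv.1, [("image_elements", s.1), ("table_elements", s.2.1),
                       ("text_elements", s.2.2), ("elements", kv.2)])]) []

-- ===== PORT B =====
def pvCatB (e : List (String × String)) : Option String := e.lookup "category"

def extract_tag_elements_per_page_alt (page_elements : List (String × List (List (String × String)))) : List (String × List (String × List (List (String × String)))) :=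
  page_elements.map (fun kv =>
    (kv.1, [("image_elements", kv.2.filter (fun e => pvCatB e == some "figure")),
            ("table_elements", kv.2.filter (fun e => pvCatB e == some "table")),
            ("text_elements", kv.2.filter (fun e => !(pvCatB e == some "figure" || pvCatB e == some "table"))),
            ("elements", kv.2)]))

-- ===== PRECONDITION & SPEC =====
-- Pre_ excludes exactly the inputs where some element dict has no "category" key:
-- there Python A (and Python B) raise KeyError.
def Pre_extract_tag_elements_per_page (page_elements : List (String × List (List (String × String)))) : Prop :=
  ∀ kv ∈ page_elements, ∀ e ∈ kv.2, (e.lookup "category").isSome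
instance (page_elements : List (String × List (List (String × String)))) : Decidable (Pre_extract_tag_elements_per_page page_elements) := by unfold Pre_extract_tag_elements_per_page; infer_instance

def pvWitness_extract_tag_elements_per_page : (List (String × List (List (String × String)))) :=
  [("1", [[("category", "figure")], [("category", "para"), ("id", "x")]]), ("2", [])]

def Spec_extract_tag_elements_per_page (page_elements : List (String × List (List (String × String)))) (out : List (String × List (String × List (List (String × String))))) : Prop := out = extract_tag_elements_per_page_alt page_elements
instance (page_elements : List (String × List (List (String × String)))) (out : List (String × List (String × List (List (String × String))))) : Decidable (Spec_extract_tag_elements_per_page page_elements out) := by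
  unfold Spec_extract_tag_elements_per_page
  have h3 : DecidableEq (String × List (List (String × String))) := @instDecidableEqProd _ _ _ inferInstance
  have h4 : DecidableEq (List (String × List (List (String × String)))) := @instDecidableEqList _ h3
  have h5 : DecidableEq (String × List (String × List (List (String × String)))) := @instDecidableEqProd _ _ _ h4
  exact @instDecidableEqList _ h5 _ _

-- ===== CLAIM (what is proved, stated in full; the proofs are below) =====
def Claim_equal_extract_tag_elements_per_page : Prop := ∀ (page_elements : List (String × List (List (String × String)))), Dom_extract_tag_elements_per_page page_elements → Pre_extract_tag_elements_per_page page_elements → Spec_extract_tag_elements_per_page page_elements (extract_tag_elements_per_page page_elements)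

-- ===== LEMMAS AND PROOFS =====

-- The inner classification fold, started from any accumulators, appends exactly the three filters.
theorem inner_fold_eq (l : List (List (String × String)))
    (s : List (List (String × String)) × List (List (String × String)) × List (List (String × String))) :
    l.foldl (fun s e =>
      if pvCatA e = some "figure" then (s.1 ++ [e], s.2.1, s.2.2)
      else if pvCatA e = some "table" then (s.1, s.2.1 ++ [e], s.2.2)
      else (s.1, s.2.1, s.2.2 ++ [e])) s
    = (s.1 ++ l.filter (fun e => pvCatB e == some "figure"),
       s.2.1 ++ l.filter (fun e => pvCatB e == some "table"),
       s.2.2 ++ l.filter (fun e => !(pvCatB e == some "figure" || pvCatB e == some "table"))) := by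
  simp only [show pvCatB = pvCatA from rfl]
  induction l generalizing s with
  | nil => simp
  | cons e l ih =>
    rw [List.foldl_cons]
    by_cases h1 : pvCatA e = some "figure"
    · simp [h1, ih]
    · by_cases h2 : pvCatA e = some "table"
      · simp [h2, ih]
      · simp [h1, h2, ih]

-- The outer fold-with-append is the map.
theorem outer_eq (page_elements : List (String × List (List (String × String))))
    (acc : List (String × List (String × List (List (String × String)))))  :
    page_elements.foldl (fun parsed kv =>
      let s := kv.2.foldl (fun (s : List (List (String × String)) × List (List (String × String)) × List (List (String × String))) e =>
        if pvCatA e = some "figure" then (s.1 ++ [e], s.2.1, s.2.2)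
        else if pvCatA e = some "table" then (s.1, s.2.1 ++ [e], s.2.2)
        else (s.1, s.2.1, s.2.2 ++ [e])) ([], [], [])
      parsed ++ [(kv.1, [("image_elements", s.1), ("table_elements", s.2.1),
                         ("text_elements", s.2.2), ("elements", kv.2)])]) acc
    = acc ++ extract_tag_elements_per_page_alt page_elements := by
  induction page_elements generalizing acc with
  | nil => simp [extract_tag_elements_per_page_alt]
  | cons kv rest ih =>
    rw [List.foldl_cons, ih]
    simp [extract_tag_elements_per_page_alt, inner_fold_eq]

-- ===== VERDICT (by name: the statement is the Claim_ definition above) =====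
theorem extract_tag_elements_per_page_spec : Claim_equal_extract_tag_elements_per_page := by
  intro pes _ _
  unfold Spec_extract_tag_elements_per_page extract_tag_elements_per_page
  simpa using outer_eq pes []
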